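-- pv_equiv track=rewrite | github.com/google/XNNPACK | tools/xnncommon.py | parse_target_name
-- ===== SOURCE A (Python) =====
-- _ARCH_TO_MACRO_MAP = {
--   "aarch32": "XNN_ARCH_ARM",
--   "aarch64": "XNN_ARCH_ARM64",
--   "x86-32": "XNN_ARCH_X86",
--   "x86-64": "XNN_ARCH_X86_64",
--   "hexagon": "XNN_ARCH_HEXAGON",
--   "riscv": "XNN_ARCH_RISCV",
--   "wasm": "XNN_ARCH_WASM",
--   "wasmsimd": "XNN_ARCH_WASMSIMD",
--   "wasmrelaxedsimd": "XNN_ARCH_WASMRELAXEDSIMD",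
--   "wasm32": "XNN_ARCH_WASM",
--   "wasmsimd32": "XNN_ARCH_WASMSIMD",
--   "wasmrelaxedsimd32": "XNN_ARCH_WASMRELAXEDSIMD",
-- }
--
-- _ISA_TO_ARCH_MAP = {
--   "armsimd32": ["aarch32"],
--   "fp16arith": ["aarch32", "aarch64"],
--   "neon": ["aarch32", "aarch64"],
--   "neonfp16": ["aarch32", "aarch64"],
--   "neonfma": ["aarch32", "aarch64"],
--   "neonv8": ["aarch32", "aarch64"],
--   "neonfp16arith": ["aarch32", "aarch64"],
--   "neonbf16": ["aarch32", "aarch64"],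
--   "neondot": ["aarch32", "aarch64"],
--   "neondotfp16arith": ["aarch32", "aarch64"],
--   "neoni8mm": ["aarch32", "aarch64"],
--   "sse": ["x86-32", "x86-64"],
--   "sse2": ["x86-32", "x86-64"],
--   "ssse3": ["x86-32", "x86-64"],
--   "sse41": ["x86-32", "x86-64"],
--   "avx": ["x86-32", "x86-64"],
--   "f16c": ["x86-32", "x86-64"],
--   "fma3": ["x86-32", "x86-64"],
--   "avx2": ["x86-32", "x86-64"],
--   "avx512f": ["x86-32", "x86-64"],
--   "avx512skx": ["x86-32", "x86-64"],
--   "avx512vbmi": ["x86-32", "x86-64"],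
--   "avx512vnni": ["x86-32", "x86-64"],
--   "avx512vnnigfni": ["x86-32", "x86-64"],
--   "avx512amx": ["x86-32", "x86-64"],
--   "avx512fp16": ["x86-32", "x86-64"],
--   "avxvnni": ["x86-32", "x86-64"],
--   "avx256skx": ["x86-32", "x86-64"],
--   "avx256vnni": ["x86-32", "x86-64"],
--   "avx256vnnigfni": ["x86-32", "x86-64"],
--   "hexagon": ["hexagon"],
--   "hvx": ["hexagon"],
--   "rvv": ["riscv"],
--   "rvvfp16arith": ["riscv"],
--   "wasm32": ["wasm", "wasmsimd"],
--   "wasm": ["wasm", "wasmsimd", "wasmrelaxedsimd"],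
--   "wasmsimd": ["wasmsimd", "wasmrelaxedsimd"],
--   "wasmrelaxedsimd": ["wasmrelaxedsimd"],
--   "wasmpshufb": ["wasmrelaxedsimd"],
--   "wasmsdot": ["wasmrelaxedsimd"],
--   "wasmusdot": ["wasmrelaxedsimd"],
--   "wasmblendvps": ["wasmrelaxedsimd"],
-- }
--
-- def parse_target_name(target_name):
--   arch = list()
--   isa = None
--   assembly = False
--   for target_part in target_name.split("_"):
--     if target_part in _ARCH_TO_MACRO_MAP:
--       if target_part in _ISA_TO_ARCH_MAP:
--         arch = _ISA_TO_ARCH_MAP[target_part]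
--         isa = target_part
--       else:
--         arch = [target_part]
--     elif target_part in _ISA_TO_ARCH_MAP:
--       isa = target_part
--     elif target_part == "asm":
--       assembly = True
--   if isa and not arch:
--     arch = _ISA_TO_ARCH_MAP[isa]
--
--   return arch, isa, assembly
-- ===== SOURCE B (Python) =====
-- # Grouped-table re-implementation: a key set for arches, ISA keys grouped by their
-- # arch list, and three independent derivations over the split parts.
--
-- _ARCH_KEYS = frozenset((
--   "aarch32", "aarch64", "x86-32", "x86-64", "hexagon", "riscv",
--   "wasm", "wasmsimd", "wasmrelaxedsimd", "wasm32", "wasmsimd32",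
--   "wasmrelaxedsimd32",
-- ))
--
-- # (isa names, arch list) groups, in the same priority order as the original map
-- _ISA_GROUPS = (
--   (("armsimd32",), ["aarch32"]),
--   (("fp16arith", "neon", "neonfp16", "neonfma", "neonv8", "neonfp16arith",
--     "neonbf16", "neondot", "neondotfp16arith", "neoni8mm"),
--    ["aarch32", "aarch64"]),
--   (("sse", "sse2", "ssse3", "sse41", "avx", "f16c", "fma3", "avx2",
--     "avx512f", "avx512skx", "avx512vbmi", "avx512vnni", "avx512vnnigfni",
--     "avx512amx", "avx512fp16", "avxvnni", "avx256skx", "avx256vnni",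
--     "avx256vnnigfni"),
--    ["x86-32", "x86-64"]),
--   (("hexagon", "hvx"), ["hexagon"]),
--   (("rvv", "rvvfp16arith"), ["riscv"]),
--   (("wasm32",), ["wasm", "wasmsimd"]),
--   (("wasm",), ["wasm", "wasmsimd", "wasmrelaxedsimd"]),
--   (("wasmsimd",), ["wasmsimd", "wasmrelaxedsimd"]),
--   (("wasmrelaxedsimd", "wasmpshufb", "wasmsdot", "wasmusdot",
--     "wasmblendvps"),
--    ["wasmrelaxedsimd"]),
-- )
--
--
-- def _isa_arch(part):
--   for names, archs in _ISA_GROUPS: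
--     if part in names:
--       return archs
--   return None
--
--
-- def parse_target_name(target_name):
--   parts = target_name.split("_")
--   assembly = "asm" in parts
--   isa = next((p for p in reversed(parts) if _isa_arch(p) is not None), None)
--   arch_part = next((p for p in reversed(parts) if p in _ARCH_KEYS), None)
--   if arch_part is not None:
--     arch = _isa_arch(arch_part) or [arch_part]
--   elif isa is not None:
--     arch = _isa_arch(isa)
--   else:
--     arch = []
--   return arch, isa, assembly
-- ===== Notes on version B (the rewrite author's own statement) =====
-- stated objective: alternative
-- what changed: Replaced the single stateful priority loop over two per-key dicts with three independent derivations over the split parts (an 'asm' membership test and two last-match reversed scans) backed by restructured tables: a plain arch key set and the ISA map grouped by its arch list.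
import Mathlib
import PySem

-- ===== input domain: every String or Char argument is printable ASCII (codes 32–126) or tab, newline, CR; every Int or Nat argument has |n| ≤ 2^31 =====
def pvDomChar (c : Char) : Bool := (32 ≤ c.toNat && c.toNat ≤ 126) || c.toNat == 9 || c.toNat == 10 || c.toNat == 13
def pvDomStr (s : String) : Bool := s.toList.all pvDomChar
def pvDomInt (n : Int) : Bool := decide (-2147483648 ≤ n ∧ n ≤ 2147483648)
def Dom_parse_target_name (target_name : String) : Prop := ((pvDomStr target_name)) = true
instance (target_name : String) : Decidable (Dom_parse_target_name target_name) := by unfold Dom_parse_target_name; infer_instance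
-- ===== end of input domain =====

-- B replaces A's single stateful priority loop over two per-key dicts by three independent
-- reversed scans over different tables (an arch key list and an ISA table grouped by arch
-- list) — objective: alternative decomposition and data layout.

-- ===== PORT A =====
-- A's two module-level dicts
def pvArchMap : PySem.Dict String String := PySem.Dict.mk [
  ("aarch32", "XNN_ARCH_ARM"), ("aarch64", "XNN_ARCH_ARM64"),
  ("x86-32", "XNN_ARCH_X86"), ("x86-64", "XNN_ARCH_X86_64"),
  ("hexagon", "XNN_ARCH_HEXAGON"), ("riscv", "XNN_ARCH_RISCV"),
  ("wasm", "XNN_ARCH_WASM"), ("wasmsimd", "XNN_ARCH_WASMSIMD"),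
  ("wasmrelaxedsimd", "XNN_ARCH_WASMRELAXEDSIMD"), ("wasm32", "XNN_ARCH_WASM"),
  ("wasmsimd32", "XNN_ARCH_WASMSIMD"), ("wasmrelaxedsimd32", "XNN_ARCH_WASMRELAXEDSIMD")]

def pvIsaMap : PySem.Dict String (List String) := PySem.Dict.mk [
  ("armsimd32", ["aarch32"]), ("fp16arith", ["aarch32", "aarch64"]),
  ("neon", ["aarch32", "aarch64"]), ("neonfp16", ["aarch32", "aarch64"]),
  ("neonfma", ["aarch32", "aarch64"]), ("neonv8", ["aarch32", "aarch64"]),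
  ("neonfp16arith", ["aarch32", "aarch64"]), ("neonbf16", ["aarch32", "aarch64"]),
  ("neondot", ["aarch32", "aarch64"]), ("neondotfp16arith", ["aarch32", "aarch64"]),
  ("neoni8mm", ["aarch32", "aarch64"]), ("sse", ["x86-32", "x86-64"]),
  ("sse2", ["x86-32", "x86-64"]), ("ssse3", ["x86-32", "x86-64"]),
  ("sse41", ["x86-32", "x86-64"]), ("avx", ["x86-32", "x86-64"]),
  ("f16c", ["x86-32", "x86-64"]), ("fma3", ["x86-32", "x86-64"]),
  ("avx2", ["x86-32", "x86-64"]), ("avx512f", ["x86-32", "x86-64"]),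
  ("avx512skx", ["x86-32", "x86-64"]), ("avx512vbmi", ["x86-32", "x86-64"]),
  ("avx512vnni", ["x86-32", "x86-64"]), ("avx512vnnigfni", ["x86-32", "x86-64"]),
  ("avx512amx", ["x86-32", "x86-64"]), ("avx512fp16", ["x86-32", "x86-64"]),
  ("avxvnni", ["x86-32", "x86-64"]), ("avx256skx", ["x86-32", "x86-64"]),
  ("avx256vnni", ["x86-32", "x86-64"]), ("avx256vnnigfni", ["x86-32", "x86-64"]),
  ("hexagon", ["hexagon"]), ("hvx", ["hexagon"]),
  ("rvv", ["riscv"]), ("rvvfp16arith", ["riscv"]),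
  ("wasm32", ["wasm", "wasmsimd"]), ("wasm", ["wasm", "wasmsimd", "wasmrelaxedsimd"]),
  ("wasmsimd", ["wasmsimd", "wasmrelaxedsimd"]), ("wasmrelaxedsimd", ["wasmrelaxedsimd"]),
  ("wasmpshufb", ["wasmrelaxedsimd"]), ("wasmsdot", ["wasmrelaxedsimd"]),
  ("wasmusdot", ["wasmrelaxedsimd"]), ("wasmblendvps", ["wasmrelaxedsimd"])]

-- A's loop body, one target_part at a time
def pvStepA (s : List String × Option String × Bool) (p : String) :
    List String × Option String × Bool :=
  match s with
  | (arch, isa, assembly) =>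
    if pvArchMap.contains p then
      if pvIsaMap.contains p then (pvIsaMap.getD p [], some p, assembly)
      else ([p], isa, assembly)
    else if pvIsaMap.contains p then (arch, some p, assembly)
    else if p == "asm" then (arch, isa, true)
    else (arch, isa, assembly)

def parse_target_name (target_name : String) : List String × Option String × Bool :=
  match (((PySem.Chars.splitOn target_name.toList "_".toList).map String.ofList).foldl pvStepA ([], none, false) : List String × Option String × Bool) with
  | (arch, isa, assembly) =>
    -- Python's 'if isa and not arch': isa truthy = not None and not ""
    if isa.getD "" ≠ "" ∧ arch = [] then (pvIsaMap.getD (isa.getD "") [], isa, assembly)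
    else (arch, isa, assembly)

-- ===== PORT B =====
-- B's tables: the arch key set as a plain list, and the ISA map grouped by arch list
def pvArchKeys : List String :=
  ["aarch32", "aarch64", "x86-32", "x86-64", "hexagon", "riscv",
   "wasm", "wasmsimd", "wasmrelaxedsimd", "wasm32", "wasmsimd32",
   "wasmrelaxedsimd32"]

def pvIsaGroups : List (List String × List String) :=
  [ (["armsimd32"], ["aarch32"]),
    (["fp16arith", "neon", "neonfp16", "neonfma", "neonv8", "neonfp16arith",
      "neonbf16", "neondot", "neondotfp16arith", "neoni8mm"],
     ["aarch32", "aarch64"]),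
    (["sse", "sse2", "ssse3", "sse41", "avx", "f16c", "fma3", "avx2",
      "avx512f", "avx512skx", "avx512vbmi", "avx512vnni", "avx512vnnigfni",
      "avx512amx", "avx512fp16", "avxvnni", "avx256skx", "avx256vnni",
      "avx256vnnigfni"],
     ["x86-32", "x86-64"]),
    (["hexagon", "hvx"], ["hexagon"]),
    (["rvv", "rvvfp16arith"], ["riscv"]),
    (["wasm32"], ["wasm", "wasmsimd"]),
    (["wasm"], ["wasm", "wasmsimd", "wasmrelaxedsimd"]),
    (["wasmsimd"], ["wasmsimd", "wasmrelaxedsimd"]),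
    (["wasmrelaxedsimd", "wasmpshufb", "wasmsdot", "wasmusdot", "wasmblendvps"],
     ["wasmrelaxedsimd"]) ]

-- Source B's _isa_arch: scan the groups for one whose name list holds the part
def pvIsaArch? (part : String) : Option (List String) :=
  (pvIsaGroups.find? (fun g => g.1.contains part)).map Prod.snd

def parse_target_name_alt (target_name : String) : List String × Option String × Bool :=
  let parts : List String := (PySem.Chars.splitOn target_name.toList "_".toList).map String.ofList
  let assembly := parts.contains "asm"
  let isa := parts.reverse.find? (fun p => (pvIsaArch? p).isSome)
  let archPart := parts.reverse.find? (fun p => pvArchKeys.contains p)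
  let arch :=
    match archPart with
    | some p =>
      -- '_isa_arch(arch_part) or [arch_part]' (group lists are never empty/falsy)
      match pvIsaArch? p with
      | some l => l
      | none => [p]
    | none =>
      match isa with
      | some i => (pvIsaArch? i).getD []   -- isa is a group key here, so never none
      | none => []
  (arch, isa, assembly)

-- ===== PRECONDITION & SPEC =====
def Spec_parse_target_name (target_name : String) (out : List String × Option String × Bool) : Prop := out = parse_target_name_alt target_name
instance (target_name : String) (out : List String × Option String × Bool) : Decidable (Spec_parse_target_name target_name out) := by unfold Spec_parse_target_name; infer_instance

-- ===== CLAIM (what is proved, stated in full; the proofs are below) =====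
def Claim_equal_parse_target_name : Prop := ∀ (target_name : String), Dom_parse_target_name target_name → Spec_parse_target_name target_name (parse_target_name target_name)

-- ===== LEMMAS AND PROOFS =====

-- B's arch key list holds exactly A's arch-map keys
theorem pv_arch_keys_eq (p : String) : pvArchKeys.contains p = pvArchMap.contains p := by
  simp only [pvArchMap, pvArchKeys, PySem.Dict.contains_mk, List.contains_eq_mem,
    List.any_cons, List.any_nil, Bool.or_false,
    List.mem_cons, List.not_mem_nil, or_false]
  rw [Bool.eq_iff_iff]
  simp only [decide_eq_true_eq, Bool.or_eq_true, beq_iff_eq]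
  constructor <;> intro h <;> tauto

-- B's group scan succeeds exactly on A's isa-map keys, with A's value
theorem pv_isa_some (p : String) (h : pvIsaMap.contains p = true) :
    pvIsaArch? p = some (pvIsaMap.getD p []) := by
  simp only [pvIsaMap, PySem.Dict.contains_mk, List.any_cons, List.any_nil,
    beq_iff_eq, Bool.or_eq_true, Bool.or_false, or_false] at h
  rcases h with h|h|h|h|h|h|h|h|h|h|h|h|h|h|h|h|h|h|h|h|h|h|h|h|h|h|h|h|h|h|h|h|h|h|h|h|h|h|h|h|h|h <;>
    subst h <;> decide

theorem pv_isa_none (p : String) (h : pvIsaMap.contains p = false) :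
    pvIsaArch? p = none := by
  simp only [pvIsaMap, PySem.Dict.contains_mk, List.any_cons, List.any_nil,
    beq_iff_eq, Bool.or_eq_false_iff, Bool.or_false, beq_eq_false_iff_ne] at h
  obtain ⟨h1,h2,h3,h4,h5,h6,h7,h8,h9,h10,h11,h12,h13,h14,h15,h16,h17,h18,h19,h20,h21,
    h22,h23,h24,h25,h26,h27,h28,h29,h30,h31,h32,h33,h34,h35,h36,h37,h38,h39,h40,h41,h42⟩ := h
  simp [pvIsaArch?, pvIsaGroups, List.find?_cons,
    Ne.symm h1, Ne.symm h2, Ne.symm h3, Ne.symm h4, Ne.symm h5, Ne.symm h6, Ne.symm h7,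
    Ne.symm h8, Ne.symm h9, Ne.symm h10, Ne.symm h11, Ne.symm h12, Ne.symm h13, Ne.symm h14,
    Ne.symm h15, Ne.symm h16, Ne.symm h17, Ne.symm h18, Ne.symm h19, Ne.symm h20, Ne.symm h21,
    Ne.symm h22, Ne.symm h23, Ne.symm h24, Ne.symm h25, Ne.symm h26, Ne.symm h27, Ne.symm h28,
    Ne.symm h29, Ne.symm h30, Ne.symm h31, Ne.symm h32, Ne.symm h33, Ne.symm h34, Ne.symm h35,
    Ne.symm h36, Ne.symm h37, Ne.symm h38, Ne.symm h39, Ne.symm h40, Ne.symm h41, Ne.symm h42]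

-- no key of either map is "asm" or ""
theorem pv_arch_key_ne_asm (p : String) (h : pvArchMap.contains p = true) :
    (p == "asm") = false := by
  simp only [pvArchMap, PySem.Dict.contains, List.any_eq_true] at h
  simp only [List.mem_cons, List.not_mem_nil, or_false] at h
  rcases h with ⟨q, hq, hbeq⟩
  have hp : q.1 = p := by simpa using hbeq
  rcases hq with h|h|h|h|h|h|h|h|h|h|h|h <;> subst h <;> simp at hp <;> simp [← hp]

theorem pv_isa_key_ne_asm (p : String) (h : pvIsaMap.contains p = true) :
    (p == "asm") = false := by
  simp only [pvIsaMap, PySem.Dict.contains, List.any_eq_true] at h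
  simp only [List.mem_cons, List.not_mem_nil, or_false] at h
  rcases h with ⟨q, hq, hbeq⟩
  have hp : q.1 = p := by simpa using hbeq
  rcases hq with h|h|h|h|h|h|h|h|h|h|h|h|h|h|h|h|h|h|h|h|h|h|h|h|h|h|h|h|h|h|h|h|h|h|h|h|h|h|h|h|h|h <;>
    subst h <;> simp at hp <;> simp [← hp]

theorem pv_isa_key_ne_empty (p : String) (h : pvIsaMap.contains p = true) : p ≠ "" := by
  simp only [pvIsaMap, PySem.Dict.contains, List.any_eq_true] at h
  simp only [List.mem_cons, List.not_mem_nil, or_false] at h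
  rcases h with ⟨q, hq, hbeq⟩
  have hp : q.1 = p := by simpa using hbeq
  rcases hq with h|h|h|h|h|h|h|h|h|h|h|h|h|h|h|h|h|h|h|h|h|h|h|h|h|h|h|h|h|h|h|h|h|h|h|h|h|h|h|h|h|h <;>
    subst h <;> simp at hp <;> simp [← hp]

-- every value of pvIsaMap is a nonempty list
theorem pv_isa_getD_ne_nil (p : String) (h : pvIsaMap.contains p = true) :
    pvIsaMap.getD p [] ≠ [] := by
  simp only [pvIsaMap, PySem.Dict.contains, List.any_eq_true] at h
  simp only [List.mem_cons, List.not_mem_nil, or_false] at h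
  rcases h with ⟨q, hq, hbeq⟩
  have hp : q.1 = p := by simpa using hbeq
  rcases hq with h|h|h|h|h|h|h|h|h|h|h|h|h|h|h|h|h|h|h|h|h|h|h|h|h|h|h|h|h|h|h|h|h|h|h|h|h|h|h|h|h|h <;>
    subst h <;> rw [← hp] <;> decide

-- characterisation of A's loop: the three state components are independent scans
theorem pv_foldA (parts : List String) (arch0 : List String) (isa0 : Option String) (asm0 : Bool) :
    parts.foldl pvStepA (arch0, isa0, asm0) =
    ( (match parts.reverse.find? (fun p => pvArchMap.contains p) with
       | some p => if pvIsaMap.contains p then pvIsaMap.getD p [] else [p]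
       | none => arch0),
      (match parts.reverse.find? (fun p => pvIsaMap.contains p) with
       | some p => some p
       | none => isa0),
      asm0 || parts.any (fun p => p == "asm") ) := by
  induction parts generalizing arch0 isa0 asm0 with
  | nil => simp
  | cons p rest ih =>
    rw [List.foldl_cons, List.reverse_cons, List.find?_append, List.find?_append, List.any_cons]
    by_cases ha : pvArchMap.contains p = true
    · by_cases hi : pvIsaMap.contains p = true
      · rw [show pvStepA (arch0, isa0, asm0) p = (pvIsaMap.getD p [], some p, asm0) by
          simp [pvStepA, ha, hi]]
        rw [ih]
        cases hra : rest.reverse.find? (fun p => pvArchMap.contains p) <;>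
        cases hri : rest.reverse.find? (fun p => pvIsaMap.contains p) <;>
          simp [ha, hi, pv_arch_key_ne_asm p ha]
      · rw [show pvStepA (arch0, isa0, asm0) p = ([p], isa0, asm0) by
          simp [pvStepA, ha, hi]]
        rw [ih]
        cases hra : rest.reverse.find? (fun p => pvArchMap.contains p) <;>
        cases hri : rest.reverse.find? (fun p => pvIsaMap.contains p) <;>
          simp [ha, hi, pv_arch_key_ne_asm p ha]
    · by_cases hi : pvIsaMap.contains p = true
      · rw [show pvStepA (arch0, isa0, asm0) p = (arch0, some p, asm0) by
          simp [pvStepA, ha, hi]]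
        rw [ih]
        cases hra : rest.reverse.find? (fun p => pvArchMap.contains p) <;>
        cases hri : rest.reverse.find? (fun p => pvIsaMap.contains p) <;>
          simp [ha, hi, pv_isa_key_ne_asm p hi]
      · by_cases hb : (p == "asm") = true
        · rw [show pvStepA (arch0, isa0, asm0) p = (arch0, isa0, true) by
            simp [pvStepA, ha, hi, hb]]
          rw [ih]
          cases hra : rest.reverse.find? (fun p => pvArchMap.contains p) <;>
          cases hri : rest.reverse.find? (fun p => pvIsaMap.contains p) <;>
            simp [ha, hi, hb]
        · rw [show pvStepA (arch0, isa0, asm0) p = (arch0, isa0, asm0) by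
            simp [pvStepA, ha, hi, hb]]
          rw [ih]
          cases hra : rest.reverse.find? (fun p => pvArchMap.contains p) <;>
          cases hri : rest.reverse.find? (fun p => pvIsaMap.contains p) <;>
            simp [ha, hi, hb]

-- 'asm' in parts, the two spellings
theorem pv_asm (parts : List String) : (parts.any fun p => p == "asm") = decide ("asm" ∈ parts) := by
  rw [Bool.eq_iff_iff]
  simp only [List.any_eq_true, beq_iff_eq, decide_eq_true_eq]
  exact ⟨fun ⟨x, hx, e⟩ => e ▸ hx, fun h => ⟨_, h, rfl⟩⟩

-- B's scan predicates coincide with A's dict-membership predicates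
theorem pv_pred_isa : (fun p => (pvIsaArch? p).isSome) = (fun p => pvIsaMap.contains p) := by
  funext p
  by_cases h : pvIsaMap.contains p = true
  · simp [pv_isa_some p h, h]
  · simp [pv_isa_none p (by simpa using h), (by simpa using h : pvIsaMap.contains p = false)]

theorem pv_pred_arch : (fun p => pvArchKeys.contains p) = (fun p => pvArchMap.contains p) := by
  funext p; exact pv_arch_keys_eq p

-- ===== VERDICT (by name: the statement is the Claim_ definition above) =====
theorem parse_target_name_spec : Claim_equal_parse_target_name := by
  intro t _
  unfold Spec_parse_target_name parse_target_name parse_target_name_alt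
  dsimp only
  rw [pv_pred_isa, pv_pred_arch]
  generalize (PySem.Chars.splitOn t.toList "_".toList).map String.ofList = parts
  rw [pv_foldA]
  cases hra : parts.reverse.find? (fun p => pvArchMap.contains p) with
  | some p =>
    have hmem := List.find?_some hra
    by_cases hi : pvIsaMap.contains p = true
    · simp [hi, pv_isa_getD_ne_nil p hi, pv_isa_some p hi]
      constructor
      · cases parts.reverse.find? (fun p => pvIsaMap.contains p) <;> rfl
      · exact pv_asm parts
    · simp [hi, pv_isa_none p (by simpa using hi)]
      constructor
      · cases parts.reverse.find? (fun p => pvIsaMap.contains p) <;> rfl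
      · exact pv_asm parts
  | none =>
    cases hri : parts.reverse.find? (fun p => pvIsaMap.contains p) with
    | some i =>
      have hmem := List.find?_some hri
      simp [pv_isa_key_ne_empty i hmem, pv_isa_some i hmem, pv_asm]
    | none =>
      simp [pv_asm]
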